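-- pv_equiv track=rewrite | github.com/JoeLove100/leet-code | thirty_day_challenge/day_14.py | get_shifted_text
-- ===== SOURCE A (Python) =====
-- from typing import List
-- from collections import deque
--
-- def get_shifted_text(text: str,
--                      all_shifts: List[List[int]]) -> str:
--
--     text = deque(text)
--     for shift in all_shifts:
--
--         shift_direction = shift[0]
--         shift_length = shift[1]
--         if shift_direction == 0:
--             text.rotate(len(text) - shift_length)
--         else:
--             text.rotate(shift_length)
--
--     text = "".join(text)
--     return text
-- ===== SOURCE B (Python) =====
-- def get_shifted_text(text, all_shifts):
--     n = len(text)
--     if n == 0: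
--         return text
--     k = sum(s[1] if s[0] != 0 else -s[1] for s in all_shifts) % n
--     return text[n - k:] + text[:n - k]
-- ===== Notes on version B (the rewrite author's own statement) =====
-- stated objective: faster
-- what changed: A rotates the whole deque once per shift; B sums the net signed shift, reduces it mod len(text) and performs a single slice-based rotation.
import Mathlib
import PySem

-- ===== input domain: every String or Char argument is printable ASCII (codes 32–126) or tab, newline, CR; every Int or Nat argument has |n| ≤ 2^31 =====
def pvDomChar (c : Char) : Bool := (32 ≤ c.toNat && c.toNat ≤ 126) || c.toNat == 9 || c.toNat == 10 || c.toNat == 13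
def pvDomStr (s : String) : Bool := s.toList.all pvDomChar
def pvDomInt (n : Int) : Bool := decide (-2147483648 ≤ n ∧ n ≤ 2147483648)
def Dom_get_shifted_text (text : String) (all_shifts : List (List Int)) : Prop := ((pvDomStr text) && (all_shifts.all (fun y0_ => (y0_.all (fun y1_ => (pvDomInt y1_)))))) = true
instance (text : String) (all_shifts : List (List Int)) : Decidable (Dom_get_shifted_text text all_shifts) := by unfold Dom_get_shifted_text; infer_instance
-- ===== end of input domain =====

-- B replaces A's per-shift deque rotation by one net shift (sum mod length) and a single slice rotation (faster, asymptotic).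

-- ===== PORT A =====
-- deque.rotate k on a deque of length n > 0: move the last (k mod n) elements to the front
-- (exact for every Int k; on an empty deque it is a no-op, as in Python).
def pyRotate (l : List Char) (k : Int) : List Char :=
  if l.length = 0 then l
  else
    l.drop (l.length - (PySem.Int.mod k (l.length : Int)).toNat)
      ++ l.take (l.length - (PySem.Int.mod k (l.length : Int)).toNat)

def get_shifted_text (text : String) (all_shifts : List (List Int)) : String :=
  let cs := all_shifts.foldl (fun t shift =>
    let shift_direction := (PySem.List.pyGet? shift 0).getD 0
    let shift_length := (PySem.List.pyGet? shift 1).getD 0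
    if shift_direction = 0 then pyRotate t ((t.length : Int) - shift_length)
    else pyRotate t shift_length) text.toList
  String.ofList cs

-- ===== PORT B =====
-- sum(s[1] if s[0] != 0 else -s[1] for s in all_shifts) from Source B
def netShift (all_shifts : List (List Int)) : Int :=
  all_shifts.foldl (fun acc s =>
    acc + (if (PySem.List.pyGet? s 0).getD 0 ≠ 0 then (PySem.List.pyGet? s 1).getD 0
           else -((PySem.List.pyGet? s 1).getD 0))) 0

def get_shifted_text_alt (text : String) (all_shifts : List (List Int)) : String :=
  let cs := text.toList
  let n := cs.length
  if n = 0 then text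
  else
    let k := (PySem.Int.mod (netShift all_shifts) (n : Int)).toNat
    -- text[n-k:] + text[:n-k]  (0 ≤ k < n, so these slices are exactly drop/take)
    String.ofList (cs.drop (n - k) ++ cs.take (n - k))

-- ===== PRECONDITION & SPEC =====
-- Pre_ excludes inputs where some shift has fewer than two entries: there Python A raises IndexError.
def Pre_get_shifted_text (text : String) (all_shifts : List (List Int)) : Prop :=
  ∀ s ∈ all_shifts, 2 ≤ s.length
instance (text : String) (all_shifts : List (List Int)) : Decidable (Pre_get_shifted_text text all_shifts) := by unfold Pre_get_shifted_text; infer_instance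

def pvWitness_get_shifted_text : String × List (List Int) := ("abcdef", [[0, 2], [1, 3], [0, -1]])

def Spec_get_shifted_text (text : String) (all_shifts : List (List Int)) (out : String) : Prop := out = get_shifted_text_alt text all_shifts
instance (text : String) (all_shifts : List (List Int)) (out : String) : Decidable (Spec_get_shifted_text text all_shifts out) := by unfold Spec_get_shifted_text; infer_instance

-- ===== CLAIM (what is proved, stated in full; the proofs are below) =====
def Claim_equal_get_shifted_text : Prop := ∀ (text : String) (all_shifts : List (List Int)), Dom_get_shifted_text text all_shifts → Pre_get_shifted_text text all_shifts → Spec_get_shifted_text text all_shifts (get_shifted_text text all_shifts)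

-- ===== LEMMAS AND PROOFS =====

theorem pv_mod_nonneg_lt (x n : Int) (hn : 0 < n) :
    0 ≤ PySem.Int.mod x n ∧ PySem.Int.mod x n < n :=
  ⟨PySem.Int.mod_nonneg x hn, PySem.Int.mod_lt x hn⟩

-- (-x) mod n = (n - x mod n) mod n, for n > 0, in Python's (= emod's) sense
theorem pv_neg_mod (x n : Int) (hn : 0 < n) :
    PySem.Int.mod (-x) n = (n - PySem.Int.mod x n) % n := by
  rw [PySem.Int.mod_eq_emod_of_pos hn, PySem.Int.mod_eq_emod_of_pos hn]
  by_cases hd : n ∣ x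
  · rw [Int.emod_eq_zero_of_dvd hd, Int.emod_eq_zero_of_dvd (dvd_neg.mpr hd), sub_zero,
      Int.emod_self]
  · have h1 : 0 ≤ x % n := Int.emod_nonneg x (by omega)
    have h2 : x % n < n := Int.emod_lt_of_pos x hn
    have h3 : x % n ≠ 0 := fun h => hd (Int.dvd_of_emod_eq_zero h)
    have hrw : (n - x % n) % n = n - x % n := Int.emod_eq_of_lt (by omega) (by omega)
    rw [Int.neg_emod, if_neg hd, Int.natAbs_of_nonneg hn.le, hrw]

theorem pv_toNat_mod_add (x y : Int) (n : Nat) (hn : 0 < n) :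
    ((PySem.Int.mod x (n : Int)).toNat + (PySem.Int.mod y (n : Int)).toNat) % n
      = (PySem.Int.mod (x + y) (n : Int)).toNat % n := by
  have hni : 0 < (n : Int) := by exact_mod_cast hn
  obtain ⟨hx0, hxn⟩ := pv_mod_nonneg_lt x _ hni
  obtain ⟨hy0, hyn⟩ := pv_mod_nonneg_lt y _ hni
  have hz0 := PySem.Int.mod_nonneg (x + y) hni
  have hcast : ∀ a b : Nat, a % b = ((a : Int) % (b : Int)).toNat := by
    intro a b; omega
  rw [hcast, hcast]
  congr 1
  push_cast [Int.toNat_of_nonneg hx0, Int.toNat_of_nonneg hy0, Int.toNat_of_nonneg hz0]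
  rw [PySem.Int.mod_eq_emod_of_pos hni, PySem.Int.mod_eq_emod_of_pos hni,
    PySem.Int.mod_eq_emod_of_pos hni, ← Int.add_emod, Int.emod_emod_of_dvd (x + y) dvd_rfl]

-- pyRotate as a Mathlib left rotation by the negated amount
theorem pyRotate_eq_rotate (l : List Char) (k : Int) (h : l ≠ []) :
    pyRotate l k = l.rotate (PySem.Int.mod (-k) (l.length : Int)).toNat := by
  have hn0 : 0 < l.length := List.length_pos_iff.mpr h
  have hn : 0 < (l.length : Int) := by exact_mod_cast hn0
  obtain ⟨h0, hlt⟩ := pv_mod_nonneg_lt k _ hn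
  unfold pyRotate
  rw [if_neg hn0.ne', pv_neg_mod _ _ hn]
  by_cases hz : PySem.Int.mod k (l.length : Int) = 0
  · rw [hz]
    simp
  · have hm1 : 0 < PySem.Int.mod k (l.length : Int) := lt_of_le_of_ne h0 (Ne.symm hz)
    have hrw : ((l.length : Int) - PySem.Int.mod k (l.length : Int)) % (l.length : Int)
        = (l.length : Int) - PySem.Int.mod k (l.length : Int) :=
      Int.emod_eq_of_lt (by omega) (by omega)
    rw [hrw, List.rotate_eq_drop_append_take (by omega)]
    congr 1 <;> · congr 1; omega

theorem pv_foldl_shift (ss : List (List Int)) (a : Int) :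
    ss.foldl (fun acc s =>
      acc + (if (PySem.List.pyGet? s 0).getD 0 ≠ 0 then (PySem.List.pyGet? s 1).getD 0
             else -((PySem.List.pyGet? s 1).getD 0))) a
      = a + ss.foldl (fun acc s =>
          acc + (if (PySem.List.pyGet? s 0).getD 0 ≠ 0 then (PySem.List.pyGet? s 1).getD 0
                 else -((PySem.List.pyGet? s 1).getD 0))) 0 := by
  induction ss generalizing a with
  | nil => simp
  | cons t ts ih =>
    conv_lhs => rw [List.foldl_cons, ih]
    conv_rhs => rw [List.foldl_cons, ih]
    ring

theorem netShift_cons (s : List Int) (ss : List (List Int)) :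
    netShift (s :: ss)
      = (if (PySem.List.pyGet? s 0).getD 0 ≠ 0 then (PySem.List.pyGet? s 1).getD 0
         else -((PySem.List.pyGet? s 1).getD 0)) + netShift ss := by
  unfold netShift
  rw [List.foldl_cons, pv_foldl_shift]
  ring

-- A's loop on a nonempty list is one left rotation by (-netShift) mod n
theorem foldA_eq (ss : List (List Int)) (l : List Char) (h : l ≠ []) :
    ss.foldl (fun t shift =>
      let shift_direction := (PySem.List.pyGet? shift 0).getD 0
      let shift_length := (PySem.List.pyGet? shift 1).getD 0
      if shift_direction = 0 then pyRotate t ((t.length : Int) - shift_length)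
      else pyRotate t shift_length) l
    = l.rotate (PySem.Int.mod (-(netShift ss)) (l.length : Int)).toNat := by
  induction ss generalizing l with
  | nil =>
    have hn : 0 < (l.length : Int) := by exact_mod_cast List.length_pos_iff.mpr h
    simp only [List.foldl_nil, netShift, List.foldl_nil, neg_zero]
    rw [PySem.Int.mod_eq_emod_of_pos hn]
    simp
  | cons s ss ih =>
    have hn0 : 0 < l.length := List.length_pos_iff.mpr h
    have hn : 0 < (l.length : Int) := by exact_mod_cast hn0
    simp only [List.foldl_cons]
    set d := (PySem.List.pyGet? s 0).getD 0 with hd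
    set L := (PySem.List.pyGet? s 1).getD 0 with hL
    have step :
        (if d = 0 then pyRotate l ((l.length : Int) - L) else pyRotate l L)
          = l.rotate (PySem.Int.mod (-(if d ≠ 0 then L else -L)) (l.length : Int)).toNat := by
      by_cases hdz : d = 0
      · rw [if_pos hdz, if_neg (by simp [hdz]), pyRotate_eq_rotate _ _ h]
        congr 2
        rw [PySem.Int.mod_eq_emod_of_pos hn, PySem.Int.mod_eq_emod_of_pos hn]
        have he : -((l.length : Int) - L) = L - (l.length : Int) := by ring
        rw [he, Int.sub_emod_right, neg_neg]
      · rw [if_neg hdz, if_pos hdz, pyRotate_eq_rotate _ _ h]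
    rw [step]
    have hne : l.rotate (PySem.Int.mod (-(if d ≠ 0 then L else -L)) (l.length : Int)).toNat ≠ [] := by
      simpa [← List.length_pos_iff, List.length_rotate] using hn0
    rw [ih _ hne, List.length_rotate, List.rotate_rotate]
    have harith :
        ((PySem.Int.mod (-(if d ≠ 0 then L else -L)) (l.length : Int)).toNat
          + (PySem.Int.mod (-(netShift ss)) (l.length : Int)).toNat) % l.length
        = (PySem.Int.mod (-(netShift (s :: ss))) (l.length : Int)).toNat % l.length := by
      rw [pv_toNat_mod_add _ _ _ hn0, netShift_cons, ← hd, ← hL]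
      have he : (-(if d ≠ 0 then L else -L)) + (-(netShift ss))
          = -((if d ≠ 0 then L else -L) + netShift ss) := by ring
      rw [he]
    rw [← List.rotate_mod, harith, List.rotate_mod]

-- A's loop leaves the empty list empty
theorem foldA_nil (ss : List (List Int)) :
    ss.foldl (fun t shift =>
      let shift_direction := (PySem.List.pyGet? shift 0).getD 0
      let shift_length := (PySem.List.pyGet? shift 1).getD 0
      if shift_direction = 0 then pyRotate t ((t.length : Int) - shift_length)
      else pyRotate t shift_length) ([] : List Char) = [] := by
  induction ss with
  | nil => rfl
  | cons s ss ih => simpa [pyRotate] using ih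

-- ===== VERDICT (by name: the statement is the Claim_ definition above) =====
theorem get_shifted_text_spec : Claim_equal_get_shifted_text := by
  intro text all_shifts _ _
  unfold Spec_get_shifted_text get_shifted_text get_shifted_text_alt
  by_cases hnil : text.toList = []
  · rw [hnil]
    simp only [List.length_nil, foldA_nil]
    have htext : text = String.ofList [] := by
      have h2 := congrArg String.ofList hnil
      rwa [String.ofList_toList] at h2
    exact htext.symm
  · have hn0 : 0 < text.toList.length := List.length_pos_iff.mpr hnil
    have hn : 0 < (text.toList.length : Int) := by exact_mod_cast hn0
    simp only [foldA_eq _ _ hnil, if_neg hn0.ne']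
    congr 1
    obtain ⟨h0, hlt⟩ := pv_mod_nonneg_lt (netShift all_shifts) _ hn
    by_cases hz : PySem.Int.mod (netShift all_shifts) (text.toList.length : Int) = 0
    · have hneg : PySem.Int.mod (-(netShift all_shifts)) (text.toList.length : Int) = 0 := by
        rw [pv_neg_mod _ _ hn, hz, sub_zero, Int.emod_self]
      rw [hz, hneg]
      simp only [Int.toNat_zero, List.rotate_zero, Nat.sub_zero, List.drop_length,
        List.take_length, List.nil_append]
    · have hm1 : 0 < PySem.Int.mod (netShift all_shifts) (text.toList.length : Int) :=
        lt_of_le_of_ne h0 (Ne.symm hz)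
      have hneg : (PySem.Int.mod (-(netShift all_shifts)) (text.toList.length : Int)).toNat
          = text.toList.length - (PySem.Int.mod (netShift all_shifts) (text.toList.length : Int)).toNat := by
        have hrw : ((text.toList.length : Int) - PySem.Int.mod (netShift all_shifts) (text.toList.length : Int)) % (text.toList.length : Int)
            = (text.toList.length : Int) - PySem.Int.mod (netShift all_shifts) (text.toList.length : Int) :=
          Int.emod_eq_of_lt (by omega) (by omega)
        rw [pv_neg_mod _ _ hn, hrw]
        omega
      rw [hneg, List.rotate_eq_drop_append_take (by omega)]
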